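-- pv_equiv track=rewrite | github.com/georgehgfonseca/dsa-python | codingInterviews/mockGoogleDec25.py | findSmallestUnsortedSubarray2
-- ===== SOURCE A (Python) =====
-- from typing import List
--
-- def findSmallestUnsortedSubarray2(arr: List[int]) -> List[int]:
--     l, r = -1, -1
--     unsorted = -1
--     # finding start index
--     for i in range(len(arr) - 1):  # 2
--         if arr[i] > arr[i + 1]:
--             unsorted = i + 1
--             break
--
--     if unsorted == -1:
--         return []
--
--     min = arr[unsorted]
--     for i in range(unsorted + 1, len(arr)):
--         if min > arr[i]:
--             unsorted = i
--             min = arr[i]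
--
--     for i in range(len(arr) - 1):
--         if arr[i] > arr[unsorted]:
--             l = i
--             break
--
--     # finding end index
--     for i in range(len(arr) - 1, 0, -1):
--         if arr[i] < arr[i - 1]:
--             unsorted = i - 1
--             break
--
--     max = arr[unsorted]
--     for i in range(unsorted - 1, -1, -1):
--         if max < arr[i]:
--             unsorted = i
--             max = arr[i]
--
--     for i in range(len(arr) - 1, -1, -1):
--         if arr[i] < arr[unsorted]:
--             r = i
--             break
--
--     return [l, r]
-- ===== SOURCE B (Python) =====
-- from typing import List
--
-- def findSmallestUnsortedSubarray2(arr: List[int]) -> List[int]: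
--     s = sorted(arr)
--     l = 0
--     while l < len(arr) and arr[l] == s[l]:
--         l += 1
--     if l == len(arr):
--         return []
--     r = len(arr) - 1
--     while arr[r] == s[r]:
--         r -= 1
--     return [l, r]
-- ===== Notes on version B (the rewrite author's own statement) =====
-- stated objective: alternative
-- what changed: Replaces A's six sequential scan/expansion loops (first descent, suffix-min, first-greater; last ascent, prefix-max, last-smaller) with a single sort followed by two symmetric scans for the first and last index where the array differs from its sorted copy.
import Mathlib
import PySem

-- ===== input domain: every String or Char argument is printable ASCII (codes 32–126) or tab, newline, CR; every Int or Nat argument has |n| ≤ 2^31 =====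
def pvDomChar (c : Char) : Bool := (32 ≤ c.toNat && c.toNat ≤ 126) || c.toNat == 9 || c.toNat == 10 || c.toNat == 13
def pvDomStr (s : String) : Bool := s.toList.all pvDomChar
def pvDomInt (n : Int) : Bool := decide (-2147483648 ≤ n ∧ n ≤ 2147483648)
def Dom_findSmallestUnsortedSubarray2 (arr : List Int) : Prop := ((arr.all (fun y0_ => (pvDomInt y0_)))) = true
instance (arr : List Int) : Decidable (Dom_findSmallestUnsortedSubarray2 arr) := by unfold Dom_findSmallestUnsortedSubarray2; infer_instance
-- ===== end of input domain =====

-- B replaces A's six scan/expansion loops by one sort plus two scans for the first/last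
-- index where the array differs from its sorted copy (objective: alternative algorithm).

-- ===== PORT A =====
-- All list indices A uses are in range, so arr[i] is ported as arr.getD i 0 (exact there).

-- 'for i in range(len(arr)-1): if arr[i] > arr[i+1]: unsorted = i+1; break' (unsorted = -1 if no break)
def aDesc (arr : List Int) (i : Nat) : Int :=
  if h : i + 1 < arr.length then
    if arr.getD (i+1) 0 < arr.getD i 0 then ((i : Int) + 1)
    else aDesc arr (i+1)
  else -1
termination_by arr.length - i

-- 'for i in range(unsorted+1, len(arr)): if min > arr[i]: unsorted = i; min = arr[i]' (returns unsorted)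
def aMin (arr : List Int) (i : Nat) (u : Nat) (m : Int) : Nat :=
  if h : i < arr.length then
    if arr.getD i 0 < m then aMin arr (i+1) i (arr.getD i 0)
    else aMin arr (i+1) u m
  else u
termination_by arr.length - i

-- 'for i in range(len(arr)-1): if arr[i] > v: l = i; break' (l = -1 if no break)
def aFirstGt (arr : List Int) (v : Int) (i : Nat) : Int :=
  if h : i + 1 < arr.length then
    if v < arr.getD i 0 then (i : Int)
    else aFirstGt arr v (i+1)
  else -1
termination_by arr.length - i

-- 'for i in range(len(arr)-1, 0, -1): if arr[i] < arr[i-1]: unsorted = i-1; break' (k is i)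
def aAsc (arr : List Int) (k : Nat) (u : Nat) : Nat :=
  match k with
  | 0 => u
  | k' + 1 => if arr.getD (k'+1) 0 < arr.getD k' 0 then k' else aAsc arr k' u

-- 'for i in range(unsorted-1, -1, -1): if max < arr[i]: unsorted = i; max = arr[i]' (k-1 is i)
def aMax (arr : List Int) (k : Nat) (u : Nat) (M : Int) : Nat :=
  match k with
  | 0 => u
  | k' + 1 => if M < arr.getD k' 0 then aMax arr k' k' (arr.getD k' 0) else aMax arr k' u M

-- 'for i in range(len(arr)-1, -1, -1): if arr[i] < v: r = i; break' (r = -1 if no break; k-1 is i)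
def aLastLt (arr : List Int) (v : Int) (k : Nat) : Int :=
  match k with
  | 0 => -1
  | k' + 1 => if arr.getD k' 0 < v then (k' : Int) else aLastLt arr v k'

def findSmallestUnsortedSubarray2 (arr : List Int) : List Int :=
  let u := aDesc arr 0
  if u = -1 then []
  else
    let u0 := u.toNat
    let u1 := aMin arr (u0 + 1) u0 (arr.getD u0 0)
    let l := aFirstGt arr (arr.getD u1 0) 0
    let u2 := aAsc arr (arr.length - 1) u1
    let u3 := aMax arr u2 u2 (arr.getD u2 0)
    let r := aLastLt arr (arr.getD u3 0) arr.length
    [l, r]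

-- ===== PORT B =====

-- 'while l < len(arr) and arr[l] == s[l]: l += 1' (returns the stopping index l)
def bFirstDiff (arr s : List Int) (l : Nat) : Nat :=
  if h : l < arr.length then
    if arr.getD l 0 = s.getD l 0 then bFirstDiff arr s (l+1) else l
  else l
termination_by arr.length - l

-- 'r = len(arr)-1; while arr[r] == s[r]: r -= 1' (k-1 is r; the 0 case is unreachable in B's use)
def bLastDiff (arr s : List Int) (k : Nat) : Int :=
  match k with
  | 0 => -1
  | k' + 1 => if arr.getD k' 0 = s.getD k' 0 then bLastDiff arr s k' else (k' : Int)

def findSmallestUnsortedSubarray2_alt (arr : List Int) : List Int :=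
  let s := PySem.List.sorted arr (fun x => x) false
  let l := bFirstDiff arr s 0
  if l = arr.length then []
  else [(l : Int), bLastDiff arr s arr.length]

-- ===== PRECONDITION & SPEC =====
def Spec_findSmallestUnsortedSubarray2 (arr : List Int) (out : List Int) : Prop := out = findSmallestUnsortedSubarray2_alt arr
instance (arr : List Int) (out : List Int) : Decidable (Spec_findSmallestUnsortedSubarray2 arr out) := by unfold Spec_findSmallestUnsortedSubarray2; infer_instance

-- ===== CLAIM (what is proved, stated in full; the proofs are below) =====
def Claim_equal_findSmallestUnsortedSubarray2 : Prop := ∀ (arr : List Int), Dom_findSmallestUnsortedSubarray2 arr → Spec_findSmallestUnsortedSubarray2 arr (findSmallestUnsortedSubarray2 arr)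

-- ===== LEMMAS AND PROOFS =====

theorem pvChainMono (g : Nat → Int) (a b : Nat)
    (hc : ∀ t, a ≤ t → t + 1 ≤ b → g t ≤ g (t+1)) :
    ∀ p q, a ≤ p → p ≤ q → q ≤ b → g p ≤ g q := by
  intro p q hap
  induction q with
  | zero =>
    intro hpq hqb
    have hp : p = 0 := by omega
    exact le_of_eq (congrArg g hp)
  | succ m ihm =>
    intro hpq hqb
    by_cases hpm : p = m + 1
    · subst hpm; exact le_refl _
    · exact le_trans (ihm (by omega) (by omega)) (hc m (by omega) (by omega))

theorem L_aDesc_none (arr : List Int) :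
    ∀ i, (∀ j, i ≤ j → j + 1 < arr.length → arr.getD j 0 ≤ arr.getD (j+1) 0) →
    aDesc arr i = -1 := by
  suffices h : ∀ fuel i, arr.length ≤ i + fuel →
      (∀ j, i ≤ j → j + 1 < arr.length → arr.getD j 0 ≤ arr.getD (j+1) 0) →
      aDesc arr i = -1 by
    intro i hh; exact h arr.length i (by omega) hh
  intro fuel
  induction fuel with
  | zero => intro i hle _; rw [aDesc]; rw [dif_neg (by omega)]
  | succ f ih =>
    intro i hle hh
    rw [aDesc]
    by_cases hg : i + 1 < arr.length
    · rw [dif_pos hg, if_neg (by have := hh i (le_refl i) hg; omega)]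
      exact ih (i+1) (by omega) (fun j hj => hh j (by omega))
    · rw [dif_neg hg]

theorem L_aDesc_found (arr : List Int) :
    ∀ i j, i ≤ j → j + 1 < arr.length → arr.getD (j+1) 0 < arr.getD j 0 →
    ∃ j0, i ≤ j0 ∧ j0 + 1 < arr.length ∧ arr.getD (j0+1) 0 < arr.getD j0 0 ∧
      (∀ t, i ≤ t → t < j0 → arr.getD t 0 ≤ arr.getD (t+1) 0) ∧
      aDesc arr i = (j0 : Int) + 1 := by
  suffices h : ∀ fuel i, arr.length ≤ i + fuel →
      ∀ j, i ≤ j → j + 1 < arr.length → arr.getD (j+1) 0 < arr.getD j 0 →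
      ∃ j0, i ≤ j0 ∧ j0 + 1 < arr.length ∧ arr.getD (j0+1) 0 < arr.getD j0 0 ∧
        (∀ t, i ≤ t → t < j0 → arr.getD t 0 ≤ arr.getD (t+1) 0) ∧
        aDesc arr i = (j0 : Int) + 1 by
    intro i; exact h arr.length i (by omega)
  intro fuel
  induction fuel with
  | zero => intro i hle j hij hj _; omega
  | succ f ih =>
    intro i hle j hij hj hdesc
    have hg : i + 1 < arr.length := by omega
    by_cases hcur : arr.getD (i+1) 0 < arr.getD i 0
    · exact ⟨i, le_refl i, hg, hcur, fun t h1 h2 => by omega, by rw [aDesc, dif_pos hg, if_pos hcur]⟩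
    · have hij' : i + 1 ≤ j := by
        rcases Nat.eq_or_lt_of_le hij with h | h
        · exact absurd (h ▸ hdesc) hcur
        · omega
      obtain ⟨j0, h1, h2, h3, h4, h5⟩ := ih (i+1) (by omega) j hij' hj hdesc
      refine ⟨j0, by omega, h2, h3, ?_, by rw [aDesc, dif_pos hg, if_neg hcur]; exact h5⟩
      intro t ht1 ht2
      rcases Nat.eq_or_lt_of_le ht1 with h | h
      · subst h; omega
      · exact h4 t (by omega) ht2

theorem L_aMin_spec (arr : List Int) :
    ∀ i u m, arr.getD u 0 = m →
    (arr.getD (aMin arr i u m) 0 ≤ m ∧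
     (∀ j, i ≤ j → j < arr.length → arr.getD (aMin arr i u m) 0 ≤ arr.getD j 0) ∧
     (aMin arr i u m = u ∨ (i ≤ aMin arr i u m ∧ aMin arr i u m < arr.length))) := by
  suffices h : ∀ fuel i, arr.length ≤ i + fuel → ∀ u m, arr.getD u 0 = m →
      (arr.getD (aMin arr i u m) 0 ≤ m ∧
       (∀ j, i ≤ j → j < arr.length → arr.getD (aMin arr i u m) 0 ≤ arr.getD j 0) ∧
       (aMin arr i u m = u ∨ (i ≤ aMin arr i u m ∧ aMin arr i u m < arr.length))) by
    intro i u m hm; exact h arr.length i (by omega) u m hm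
  intro fuel
  induction fuel with
  | zero =>
    intro i hle u m hm
    rw [aMin, dif_neg (by omega)]
    exact ⟨le_of_eq hm, fun j hj1 hj2 => by omega, Or.inl rfl⟩
  | succ f ih =>
    intro i hle u m hm
    by_cases hg : i < arr.length
    · rw [aMin, dif_pos hg]
      by_cases hc : arr.getD i 0 < m
      · rw [if_pos hc]
        obtain ⟨ha, hb, hd⟩ := ih (i+1) (by omega) i (arr.getD i 0) rfl
        refine ⟨le_trans ha (le_of_lt hc), ?_, ?_⟩
        · intro j hj1 hj2
          rcases Nat.eq_or_lt_of_le hj1 with h | h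
          · subst h; exact ha
          · exact hb j h hj2
        · rcases hd with h | h
          · exact Or.inr (by omega)
          · exact Or.inr (by omega)
      · rw [if_neg hc]
        obtain ⟨ha, hb, hd⟩ := ih (i+1) (by omega) u m hm
        refine ⟨ha, ?_, ?_⟩
        · intro j hj1 hj2
          rcases Nat.eq_or_lt_of_le hj1 with h | h
          · subst h; exact le_trans ha (by omega)
          · exact hb j h hj2
        · rcases hd with h | h
          · exact Or.inl h
          · exact Or.inr (by omega)
    · rw [aMin, dif_neg hg]
      exact ⟨le_of_eq hm, fun j hj1 hj2 => by omega, Or.inl rfl⟩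

theorem L_aFirstGt_found (arr : List Int) (v : Int) :
    ∀ i j, i ≤ j → j + 1 < arr.length → v < arr.getD j 0 →
    ∃ l, i ≤ l ∧ l + 1 < arr.length ∧ v < arr.getD l 0 ∧
      (∀ t, i ≤ t → t < l → arr.getD t 0 ≤ v) ∧
      aFirstGt arr v i = (l : Int) := by
  suffices h : ∀ fuel i, arr.length ≤ i + fuel →
      ∀ j, i ≤ j → j + 1 < arr.length → v < arr.getD j 0 →
      ∃ l, i ≤ l ∧ l + 1 < arr.length ∧ v < arr.getD l 0 ∧
        (∀ t, i ≤ t → t < l → arr.getD t 0 ≤ v) ∧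
        aFirstGt arr v i = (l : Int) by
    intro i; exact h arr.length i (by omega)
  intro fuel
  induction fuel with
  | zero => intro i hle j hij hj _; omega
  | succ f ih =>
    intro i hle j hij hj hgt
    have hg : i + 1 < arr.length := by omega
    by_cases hcur : v < arr.getD i 0
    · exact ⟨i, le_refl i, hg, hcur, fun t h1 h2 => by omega, by rw [aFirstGt, dif_pos hg, if_pos hcur]⟩
    · have hij' : i + 1 ≤ j := by
        rcases Nat.eq_or_lt_of_le hij with h | h
        · exact absurd (h ▸ hgt) hcur
        · omega
      obtain ⟨l, h1, h2, h3, h4, h5⟩ := ih (i+1) (by omega) j hij' hj hgt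
      refine ⟨l, by omega, h2, h3, ?_, by rw [aFirstGt, dif_pos hg, if_neg hcur]; exact h5⟩
      intro t ht1 ht2
      rcases Nat.eq_or_lt_of_le ht1 with h | h
      · subst h; omega
      · exact h4 t (by omega) ht2

theorem L_aAsc_found (arr : List Int) :
    ∀ k u i, 1 ≤ i → i ≤ k → arr.getD i 0 < arr.getD (i-1) 0 →
    ∃ i1, 1 ≤ i1 ∧ i1 ≤ k ∧ arr.getD i1 0 < arr.getD (i1-1) 0 ∧
      (∀ t, i1 < t → t ≤ k → arr.getD (t-1) 0 ≤ arr.getD t 0) ∧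
      aAsc arr k u = i1 - 1 := by
  intro k
  induction k with
  | zero => intro u i h1 h2 _; omega
  | succ k' ih =>
    intro u i h1 h2 h3
    by_cases hcur : arr.getD (k'+1) 0 < arr.getD k' 0
    · refine ⟨k' + 1, by omega, le_refl _, by simpa using hcur, fun t ht1 ht2 => by omega, ?_⟩
      show aAsc arr (k'+1) u = k'
      rw [aAsc]; rw [if_pos hcur]
    · have hik : i ≤ k' := by
        rcases Nat.eq_or_lt_of_le h2 with h | h
        · subst h; simp at h3; exact absurd h3 hcur
        · omega
      obtain ⟨i1, g1, g2, g3, g4, g5⟩ := ih u i h1 hik h3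
      refine ⟨i1, g1, by omega, g3, ?_, ?_⟩
      · intro t ht1 ht2
        rcases Nat.eq_or_lt_of_le ht2 with h | h
        · subst h; simpa using le_of_not_gt hcur
        · exact g4 t ht1 (by omega)
      · show aAsc arr (k'+1) u = i1 - 1
        rw [aAsc]; rw [if_neg hcur]; exact g5

theorem L_aMax_spec (arr : List Int) :
    ∀ k u M, arr.getD u 0 = M →
    (M ≤ arr.getD (aMax arr k u M) 0 ∧
     (∀ j, j < k → arr.getD j 0 ≤ arr.getD (aMax arr k u M) 0) ∧
     (aMax arr k u M = u ∨ aMax arr k u M < k)) := by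
  intro k
  induction k with
  | zero =>
    intro u M hM
    rw [aMax]
    exact ⟨le_of_eq hM.symm, fun j hj => by omega, Or.inl rfl⟩
  | succ k' ih =>
    intro u M hM
    rw [aMax]
    by_cases hc : M < arr.getD k' 0
    · rw [if_pos hc]
      obtain ⟨ha, hb, hd⟩ := ih k' (arr.getD k' 0) rfl
      refine ⟨le_trans (le_of_lt hc) ha, ?_, ?_⟩
      · intro j hj
        rcases Nat.lt_succ_iff_lt_or_eq.mp hj with h | h
        · exact hb j h
        · subst h; exact ha
      · rcases hd with h | h
        · exact Or.inr (by omega)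
        · exact Or.inr (by omega)
    · rw [if_neg hc]
      obtain ⟨ha, hb, hd⟩ := ih u M hM
      refine ⟨ha, ?_, ?_⟩
      · intro j hj
        rcases Nat.lt_succ_iff_lt_or_eq.mp hj with h | h
        · exact hb j h
        · subst h; exact le_trans (le_of_not_gt hc) ha
      · rcases hd with h | h
        · exact Or.inl h
        · exact Or.inr (by omega)

theorem L_aLastLt_found (arr : List Int) (v : Int) :
    ∀ k i, i < k → arr.getD i 0 < v →
    ∃ r, i ≤ r ∧ r < k ∧ arr.getD r 0 < v ∧
      (∀ t, r < t → t < k → v ≤ arr.getD t 0) ∧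
      aLastLt arr v k = (r : Int) := by
  intro k
  induction k with
  | zero => intro i h _; omega
  | succ k' ih =>
    intro i hik hi
    by_cases hc : arr.getD k' 0 < v
    · refine ⟨k', by omega, by omega, hc, fun t ht1 ht2 => by omega, ?_⟩
      show aLastLt arr v (k'+1) = (k' : Int)
      rw [aLastLt]; rw [if_pos hc]
    · have hik' : i < k' := by
        rcases Nat.lt_succ_iff_lt_or_eq.mp hik with h | h
        · exact h
        · subst h; exact absurd hi hc
      obtain ⟨r, g1, g2, g3, g4, g5⟩ := ih i hik' hi
      refine ⟨r, g1, by omega, g3, ?_, ?_⟩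
      · intro t ht1 ht2
        rcases Nat.lt_succ_iff_lt_or_eq.mp ht2 with h | h
        · exact g4 t ht1 h
        · subst h; exact le_of_not_gt hc
      · show aLastLt arr v (k'+1) = (r : Int)
        rw [aLastLt]; rw [if_neg hc]; exact g5

theorem L_bfd_all (arr s : List Int) :
    ∀ i, i ≤ arr.length → (∀ t, i ≤ t → t < arr.length → arr.getD t 0 = s.getD t 0) →
    bFirstDiff arr s i = arr.length := by
  suffices h : ∀ fuel i, arr.length ≤ i + fuel →
      (∀ t, i ≤ t → t < arr.length → arr.getD t 0 = s.getD t 0) →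
      (i ≤ arr.length) → bFirstDiff arr s i = arr.length by
    intro i hi hh; exact h arr.length i (by omega) hh hi
  intro fuel
  induction fuel with
  | zero => intro i hle _ hi; rw [bFirstDiff, dif_neg (by omega)]; omega
  | succ f ih =>
    intro i hle hh hi
    by_cases hg : i < arr.length
    · rw [bFirstDiff, dif_pos hg, if_pos (hh i (le_refl i) hg)]
      exact ih (i+1) (by omega) (fun t ht => hh t (by omega)) (by omega)
    · rw [bFirstDiff, dif_neg hg]; omega

theorem L_bfd_found (arr s : List Int) :
    ∀ i l, i ≤ l → l < arr.length →
    (∀ t, i ≤ t → t < l → arr.getD t 0 = s.getD t 0) →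
    arr.getD l 0 ≠ s.getD l 0 →
    bFirstDiff arr s i = l := by
  suffices h : ∀ fuel i, arr.length ≤ i + fuel →
      ∀ l, i ≤ l → l < arr.length →
      (∀ t, i ≤ t → t < l → arr.getD t 0 = s.getD t 0) →
      arr.getD l 0 ≠ s.getD l 0 → bFirstDiff arr s i = l by
    intro i; exact h arr.length i (by omega)
  intro fuel
  induction fuel with
  | zero => intro i hle l h1 h2 _ _; omega
  | succ f ih =>
    intro i hle l h1 h2 h3 h4
    have hg : i < arr.length := by omega
    rcases Nat.eq_or_lt_of_le h1 with h | h
    · subst h; rw [bFirstDiff, dif_pos hg, if_neg h4]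
    · rw [bFirstDiff, dif_pos hg, if_pos (h3 i (le_refl i) h)]
      exact ih (i+1) (by omega) l h h2 (fun t ht => h3 t (by omega)) h4

theorem L_bld_found (arr s : List Int) :
    ∀ k r, r < k →
    (∀ t, r < t → t < k → arr.getD t 0 = s.getD t 0) →
    arr.getD r 0 ≠ s.getD r 0 →
    bLastDiff arr s k = (r : Int) := by
  intro k
  induction k with
  | zero => intro r h _ _; omega
  | succ k' ih =>
    intro r hrk hagree hdiff
    rcases Nat.lt_succ_iff_lt_or_eq.mp hrk with h | h
    · show bLastDiff arr s (k'+1) = (r : Int)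
      rw [bLastDiff, if_pos (hagree k' h (by omega))]
      exact ih r h (fun t ht1 ht2 => hagree t ht1 (by omega)) hdiff
    · subst h
      show bLastDiff arr s (r+1) = (r : Int)
      rw [bLastDiff, if_neg hdiff]

theorem pvPairwiseChain (l : List Int)
    (h : ∀ j, j + 1 < l.length → l.getD j 0 ≤ l.getD (j+1) 0) :
    l.Pairwise (· ≤ ·) := by
  rw [List.pairwise_iff_getElem]
  intro i j hi hj hij
  have hm := pvChainMono (fun t => l.getD t 0) 0 (l.length - 1)
      (fun t _ ht2 => h t (by omega)) i j (by omega) (by omega) (by omega)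
  simp only [List.getD_eq_getElem l 0 hi, List.getD_eq_getElem l 0 hj] at hm
  exact hm

theorem pvSortedDecompPrefix (arr : List Int) (l : Nat)
    (h1 : (arr.take l).Pairwise (· ≤ ·))
    (h2 : ∀ x ∈ arr.take l, ∀ y ∈ arr.drop l, x ≤ y) :
    PySem.List.sorted arr (fun x => x) false =
      arr.take l ++ PySem.List.sorted (arr.drop l) (fun x => x) false := by
  apply PySem.List.sorted_id_eq_of_perm_of_pairwise
  · have hp := List.Perm.append_left (arr.take l)
      (PySem.List.sorted_perm (arr.drop l) (fun x => x) false)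
    rw [List.take_append_drop] at hp
    exact hp
  · rw [List.pairwise_append]
    refine ⟨h1, PySem.List.sorted_pairwise (arr.drop l) (fun x => x), ?_⟩
    intro x hx y hy
    exact h2 x hx y ((PySem.List.mem_sorted _ _ _ _).mp hy)

theorem pvSortedDecompSuffix (arr : List Int) (k : Nat)
    (h1 : (arr.drop k).Pairwise (· ≤ ·))
    (h2 : ∀ x ∈ arr.take k, ∀ y ∈ arr.drop k, x ≤ y) :
    PySem.List.sorted arr (fun x => x) false =
      PySem.List.sorted (arr.take k) (fun x => x) false ++ arr.drop k := by
  apply PySem.List.sorted_id_eq_of_perm_of_pairwise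
  · have hp := List.Perm.append
      (PySem.List.sorted_perm (arr.take k) (fun x => x) false) (List.Perm.refl (arr.drop k))
    rw [List.take_append_drop] at hp
    exact hp
  · rw [List.pairwise_append]
    refine ⟨PySem.List.sorted_pairwise (arr.take k) (fun x => x), h1, ?_⟩
    intro x hx y hy
    exact h2 x ((PySem.List.mem_sorted _ _ _ _).mp hx) y hy

theorem pvGetDTake (arr : List Int) (k j : Nat) (h1 : j < k) (h2 : j < arr.length) :
    (arr.take k).getD j 0 = arr.getD j 0 := by
  rw [List.getD_eq_getElem _ 0 (by simp; omega), List.getD_eq_getElem arr 0 h2]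
  exact List.getElem_take

theorem pvGetDDrop (arr : List Int) (l j : Nat) (h : l + j < arr.length) :
    (arr.drop l).getD j 0 = arr.getD (l + j) 0 := by
  rw [List.getD_eq_getElem _ 0 (by simp; omega), List.getD_eq_getElem arr 0 h]
  exact List.getElem_drop

theorem pvGetDMemDrop (arr : List Int) (l j : Nat) (h1 : l ≤ j) (h2 : j < arr.length) :
    arr.getD j 0 ∈ arr.drop l := by
  have h3 : j - l < (arr.drop l).length := by simp; omega
  have h4 : (arr.drop l)[j - l] = arr[j]'h2 := by
    rw [List.getElem_drop]
    congr 1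
    omega
  rw [List.getD_eq_getElem arr 0 h2]
  exact h4 ▸ List.getElem_mem h3

theorem pvGetDMemTake (arr : List Int) (k j : Nat) (h1 : j < k) (h2 : j < arr.length) :
    arr.getD j 0 ∈ arr.take k := by
  have h3 : j < (arr.take k).length := by simp; omega
  have h4 : (arr.take k)[j] = arr[j]'h2 := List.getElem_take
  rw [List.getD_eq_getElem arr 0 h2]
  exact h4 ▸ List.getElem_mem h3

-- ===== VERDICT (by name: the statement is the Claim_ definition above) =====
-- the main equivalence, unsorted case
theorem pvMainUnsorted (arr : List Int) (j : Nat)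
    (hjn : j + 1 < arr.length) (hjlt : arr.getD (j+1) 0 < arr.getD j 0) :
    findSmallestUnsortedSubarray2 arr = findSmallestUnsortedSubarray2_alt arr := by
  obtain ⟨j0, -, hj0n, hj0desc, hj0min, hADesc⟩ :=
    L_aDesc_found arr 0 j (Nat.zero_le j) hjn hjlt
  -- A's first loop: u = j0 + 1
  have hu_ne : ((j0 : Int) + 1) ≠ -1 := by omega
  have htoNat : ((j0 : Int) + 1).toNat = j0 + 1 := by omega
  -- the min-expansion loop
  obtain ⟨hv1, hv2, hv3⟩ := L_aMin_spec arr (j0 + 1 + 1) (j0 + 1) (arr.getD (j0+1) 0) rfl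
  have hu1lt : aMin arr (j0+1+1) (j0+1) (arr.getD (j0+1) 0) < arr.length := by
    rcases hv3 with h | h
    · omega
    · omega
  have hu1ge : j0 + 1 ≤ aMin arr (j0+1+1) (j0+1) (arr.getD (j0+1) 0) := by
    rcases hv3 with h | h
    · omega
    · omega
  -- v = the value at the final min index
  have hvall0 : ∀ jj, j0 + 1 ≤ jj → jj < arr.length →
      arr.getD (aMin arr (j0+1+1) (j0+1) (arr.getD (j0+1) 0)) 0 ≤ arr.getD jj 0 := by
    intro jj h1 h2
    rcases Nat.eq_or_lt_of_le h1 with h | h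
    · rw [← h]; exact hv1
    · exact hv2 jj (by omega) h2
  have hvj0 : arr.getD (aMin arr (j0+1+1) (j0+1) (arr.getD (j0+1) 0)) 0 < arr.getD j0 0 :=
    lt_of_le_of_lt (hvall0 (j0+1) (le_refl _) hj0n) hj0desc
  -- the first-greater scan: the left bound l
  obtain ⟨l, -, hln, hlv, hlmin, hAFG⟩ :=
    L_aFirstGt_found arr (arr.getD (aMin arr (j0+1+1) (j0+1) (arr.getD (j0+1) 0)) 0) 0
      j0 (Nat.zero_le _) hj0n hvj0
  have hlj0 : l ≤ j0 := by
    by_contra hgt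
    push_neg at hgt
    exact absurd (hlmin j0 (Nat.zero_le _) hgt) (not_le.mpr hvj0)
  have hchain0 : ∀ p q, 0 ≤ p → p ≤ q → q ≤ j0 → arr.getD p 0 ≤ arr.getD q 0 :=
    pvChainMono (fun t => arr.getD t 0) 0 j0 (fun t ht1 ht2 => hj0min t ht1 (by omega))
  have hvall : ∀ jj, l ≤ jj → jj < arr.length →
      arr.getD (aMin arr (j0+1+1) (j0+1) (arr.getD (j0+1) 0)) 0 ≤ arr.getD jj 0 := by
    intro jj h1 h2
    by_cases hj : j0 + 1 ≤ jj
    · exact hvall0 jj hj h2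
    · exact le_trans (le_of_lt hlv) (hchain0 l jj (Nat.zero_le _) h1 (by omega))
  -- prefix decomposition of the sorted copy at l
  have htakeP : (arr.take l).Pairwise (· ≤ ·) := by
    apply pvPairwiseChain
    intro t ht
    have hlt : (arr.take l).length = l := by simp; omega
    rw [pvGetDTake arr l t (by omega) (by omega), pvGetDTake arr l (t+1) (by omega) (by omega)]
    exact hchain0 t (t+1) (Nat.zero_le _) (by omega) (by omega)
  have hcross : ∀ x ∈ arr.take l, ∀ y ∈ arr.drop l, x ≤ y := by
    intro x hx y hy
    obtain ⟨t, ht, rfl⟩ := List.mem_iff_getElem.mp hx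
    obtain ⟨d, hd, rfl⟩ := List.mem_iff_getElem.mp hy
    have ht' : t < l := by simp at ht; omega
    have htn : t < arr.length := by simp at ht; omega
    have hdn : l + d < arr.length := by simp at hd; omega
    rw [List.getElem_take, List.getElem_drop]
    rw [← List.getD_eq_getElem arr 0 htn, ← List.getD_eq_getElem arr 0 hdn]
    exact le_trans (hlmin t (Nat.zero_le _) ht') (hvall (l+d) (by omega) hdn)
  have hsdec := pvSortedDecompPrefix arr l htakeP hcross
  have hdropne : arr.drop l ≠ [] := List.ne_nil_of_length_pos (by simp; omega)
  rcases hsd : PySem.List.sorted (arr.drop l) (fun x => x) false with _ | ⟨m, tl⟩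
  · exact absurd ((PySem.List.sorted_eq_nil_iff _ _ _).mp hsd) hdropne
  · have hhead := PySem.List.key_head_sorted_le (arr.drop l) (fun x => x) hsd
    have hmv : m = arr.getD (aMin arr (j0+1+1) (j0+1) (arr.getD (j0+1) 0)) 0 := by
      refine le_antisymm (hhead _ (pvGetDMemDrop arr l _ (by omega) hu1lt)) ?_
      have hm_mem : m ∈ arr.drop l := (PySem.List.mem_sorted _ _ _ _).mp
        (hsd ▸ List.mem_cons_self)
      obtain ⟨d, hd, hdm⟩ := List.mem_iff_getElem.mp hm_mem
      have hdn : l + d < arr.length := by simp at hd; omega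
      rw [← hdm, List.getElem_drop, ← List.getD_eq_getElem arr 0 hdn]
      exact hvall (l + d) (by omega) hdn
    have htl : (arr.take l).length = l := by simp; omega
    have hsagree : ∀ t, t < l →
        arr.getD t 0 = (PySem.List.sorted arr (fun x => x) false).getD t 0 := by
      intro t ht
      rw [hsdec, List.getD_append _ _ _ _ (by omega), pvGetDTake arr l t ht (by omega)]
    have hsl : (PySem.List.sorted arr (fun x => x) false).getD l 0 = m := by
      rw [hsdec, hsd, List.getD_append_right _ _ _ _ (by omega), htl]
      simp
    have hdiffl : arr.getD l 0 ≠ (PySem.List.sorted arr (fun x => x) false).getD l 0 := by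
      rw [hsl, hmv]
      exact (ne_of_gt hlv)
    have hBfd : bFirstDiff arr (PySem.List.sorted arr (fun x => x) false) 0 = l :=
      L_bfd_found arr _ 0 l (Nat.zero_le _) (by omega) (fun t _ ht => hsagree t ht) hdiffl
    -- right side: last ascent, max expansion, last-smaller scan
    obtain ⟨i1, hi1a, hi1b, hi1c, hi1min, hAAsc⟩ :=
      L_aAsc_found arr (arr.length - 1) (aMin arr (j0+1+1) (j0+1) (arr.getD (j0+1) 0))
        (j0 + 1) (by omega) (by omega) (by simpa using hj0desc)
    have hchain1 : ∀ p q, i1 ≤ p → p ≤ q → q ≤ arr.length - 1 →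
        arr.getD p 0 ≤ arr.getD q 0 := by
      refine pvChainMono (fun t => arr.getD t 0) i1 (arr.length - 1) ?_
      intro t ht1 ht2
      have := hi1min (t+1) (by omega) (by omega)
      simpa using this
    obtain ⟨hM1, hM2, hM3⟩ := L_aMax_spec arr (i1 - 1) (i1 - 1) (arr.getD (i1-1) 0) rfl
    have hu3le : aMax arr (i1-1) (i1-1) (arr.getD (i1-1) 0) ≤ i1 - 1 := by
      rcases hM3 with h | h
      · omega
      · omega
    have hMall : ∀ jj, jj ≤ i1 - 1 →
        arr.getD jj 0 ≤ arr.getD (aMax arr (i1-1) (i1-1) (arr.getD (i1-1) 0)) 0 := by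
      intro jj hjj
      rcases Nat.eq_or_lt_of_le hjj with h | h
      · rw [h]; exact hM1
      · exact hM2 jj h
    have hi1M : arr.getD i1 0 < arr.getD (aMax arr (i1-1) (i1-1) (arr.getD (i1-1) 0)) 0 :=
      lt_of_lt_of_le hi1c hM1
    obtain ⟨r, hri, hrn, hrM, hrmin, hALL⟩ :=
      L_aLastLt_found arr (arr.getD (aMax arr (i1-1) (i1-1) (arr.getD (i1-1) 0)) 0)
        arr.length i1 (by omega) hi1M
    have hri1 : i1 ≤ r := by
      by_contra h
      push_neg at h
      exact absurd (hrmin i1 h (by omega)) (not_le.mpr hi1M)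
    -- suffix decomposition of the sorted copy at r+1
    have hdropP : (arr.drop (r+1)).Pairwise (· ≤ ·) := by
      apply pvPairwiseChain
      intro t ht
      have hlen : (arr.drop (r+1)).length = arr.length - (r+1) := by simp
      rw [pvGetDDrop arr (r+1) t (by omega), pvGetDDrop arr (r+1) (t+1) (by omega)]
      have := hchain1 (r+1+t) (r+1+(t+1)) (by omega) (by omega) (by omega)
      simpa using this
    have hcross' : ∀ x ∈ arr.take (r+1), ∀ y ∈ arr.drop (r+1), x ≤ y := by
      intro x hx y hy
      obtain ⟨t, ht, rfl⟩ := List.mem_iff_getElem.mp hx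
      obtain ⟨d, hd, rfl⟩ := List.mem_iff_getElem.mp hy
      have ht' : t ≤ r := by simp at ht; omega
      have htn : t < arr.length := by simp at ht; omega
      have hdn : r + 1 + d < arr.length := by simp at hd; omega
      rw [List.getElem_take, List.getElem_drop]
      rw [← List.getD_eq_getElem arr 0 htn, ← List.getD_eq_getElem arr 0 hdn]
      by_cases htu : t ≤ i1 - 1
      · exact le_trans (hMall t htu) (hrmin (r+1+d) (by omega) hdn)
      · exact hchain1 t (r+1+d) (by omega) (by omega) (by omega)
    have hsdec2 := pvSortedDecompSuffix arr (r+1) hdropP hcross'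
    have hTlen : (PySem.List.sorted (arr.take (r+1)) (fun x => x) false).length = r + 1 := by
      rw [PySem.List.length_sorted]
      simp
      omega
    have hsagree2 : ∀ t, r < t → t < arr.length →
        arr.getD t 0 = (PySem.List.sorted arr (fun x => x) false).getD t 0 := by
      intro t ht1 ht2
      rw [hsdec2, List.getD_append_right _ _ _ _ (by omega), hTlen,
        pvGetDDrop arr (r+1) (t - (r+1)) (by omega)]
      congr 1
      omega
    have hsr : arr.getD r 0 < (PySem.List.sorted arr (fun x => x) false).getD r 0 := by
      have hMT : arr.getD (aMax arr (i1-1) (i1-1) (arr.getD (i1-1) 0)) 0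
          ∈ PySem.List.sorted (arr.take (r+1)) (fun x => x) false := by
        rw [PySem.List.mem_sorted]
        exact pvGetDMemTake arr (r+1) _ (by omega) (by omega)
      obtain ⟨p, hp, hpM⟩ := List.mem_iff_getElem.mp hMT
      have hpr : p ≤ r := by omega
      have hmono := PySem.List.sorted_id_getElem_mono (arr.take (r+1)) hpr (by omega)
      rw [hpM] at hmono
      rw [hsdec2, List.getD_append _ _ _ _ (by omega),
        List.getD_eq_getElem (PySem.List.sorted (arr.take (r+1)) (fun x => x) false) 0
          (by rw [hTlen]; omega)]
      exact lt_of_lt_of_le hrM hmono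
    have hdiffr : arr.getD r 0 ≠ (PySem.List.sorted arr (fun x => x) false).getD r 0 :=
      ne_of_lt hsr
    have hBld : bLastDiff arr (PySem.List.sorted arr (fun x => x) false) arr.length = (r : Int) :=
      L_bld_found arr _ arr.length r hrn (fun t h1 h2 => hsagree2 t h1 h2) hdiffr
    -- assemble both sides
    have hAval : findSmallestUnsortedSubarray2 arr = [(l : Int), (r : Int)] := by
      simp only [findSmallestUnsortedSubarray2]
      rw [hADesc, if_neg hu_ne, htoNat, hAFG, hAAsc, hALL]
    have hBval : findSmallestUnsortedSubarray2_alt arr = [(l : Int), (r : Int)] := by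
      simp only [findSmallestUnsortedSubarray2_alt]
      rw [hBfd, if_neg (by omega), hBld]
    rw [hAval, hBval]

-- ===== VERDICT (by name: the statement is the Claim_ definition above) =====
theorem findSmallestUnsortedSubarray2_spec : Claim_equal_findSmallestUnsortedSubarray2 := by
  intro arr _
  unfold Spec_findSmallestUnsortedSubarray2
  by_cases hsorted : ∀ j, j + 1 < arr.length → arr.getD j 0 ≤ arr.getD (j+1) 0
  · have hA : aDesc arr 0 = -1 := L_aDesc_none arr 0 (fun j _ hj => hsorted j hj)
    have hpair : arr.Pairwise (· ≤ ·) := pvPairwiseChain arr hsorted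
    have hs : PySem.List.sorted arr (fun x => x) false = arr :=
      PySem.List.sorted_eq_self_of_pairwise arr (fun x => x) hpair
    have hB : bFirstDiff arr (PySem.List.sorted arr (fun x => x) false) 0 = arr.length := by
      rw [hs]
      exact L_bfd_all arr arr 0 (Nat.zero_le _) (fun t _ _ => rfl)
    have h1 : findSmallestUnsortedSubarray2 arr = [] := by
      simp only [findSmallestUnsortedSubarray2]
      rw [hA, if_pos rfl]
    have h2 : findSmallestUnsortedSubarray2_alt arr = [] := by
      simp only [findSmallestUnsortedSubarray2_alt]
      rw [hB, if_pos rfl]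
    rw [h1, h2]
  · push_neg at hsorted
    obtain ⟨j, hjn, hjlt⟩ := hsorted
    exact pvMainUnsorted arr j hjn hjlt
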